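-- pv_equiv track=rewrite | github.com/gregory-volkov/leetcode | solutions/2576.py | maxNumOfMarkedIndices
-- ===== SOURCE A (Python) =====
-- from typing import List
--
-- def maxNumOfMarkedIndices(nums: List[int]) -> int:
--     mid = len(nums)//2
--     i, j = 0, mid
--     res = 0
--     nums = sorted(nums)
--     while i < mid and j < len(nums):
--         if nums[j] >= nums[i]*2:
--             res += 2
--             i += 1
--         j += 1
--     return res
-- ===== SOURCE B (Python) =====
-- from typing import List
--
-- def maxNumOfMarkedIndices(nums: List[int]) -> int:
--     s = sorted(nums)
--     n = len(s)
--
--     def feasible(k: int) -> bool: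
--         # pair the k smallest with the k largest
--         return all(2 * s[i] <= s[n - k + i] for i in range(k))
--
--     lo, hi = 0, n // 2
--     while lo < hi:
--         m = (lo + hi + 1) // 2
--         if feasible(m):
--             lo = m
--         else:
--             hi = m - 1
--     return 2 * lo
-- ===== Notes on version B (the rewrite author's own statement) =====
-- stated objective: alternative
-- what changed: Replaces the greedy two-pointer scan with a binary search over the number of pairs k, using the monotone feasibility check 2*s[i] <= s[n-k+i] for i < k on the sorted array.
import Mathlib
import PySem

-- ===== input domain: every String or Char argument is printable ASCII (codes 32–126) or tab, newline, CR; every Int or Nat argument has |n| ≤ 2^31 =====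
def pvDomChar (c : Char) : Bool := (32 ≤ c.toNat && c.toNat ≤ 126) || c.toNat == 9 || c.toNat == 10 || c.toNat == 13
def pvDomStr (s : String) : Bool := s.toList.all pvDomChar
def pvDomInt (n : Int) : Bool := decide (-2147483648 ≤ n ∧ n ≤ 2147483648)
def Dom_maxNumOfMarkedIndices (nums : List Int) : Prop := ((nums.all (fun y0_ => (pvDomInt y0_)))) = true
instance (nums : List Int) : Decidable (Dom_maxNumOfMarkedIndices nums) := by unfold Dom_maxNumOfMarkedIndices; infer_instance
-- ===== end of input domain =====

-- B replaces A's greedy two-pointer scan by a binary search for the largest feasible pair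
-- count k (feasible: 2*s[i] <= s[n-k+i] for i < k on the sorted list); alternative algorithm, similar cost.


-- ===== PORT A =====
-- A's while loop; i < mid ≤ length and j < length whenever the list is indexed, so getD is exact here.
def loopA (s : List Int) (mid i j : Nat) (res : Int) : Int :=
  if h : i < mid ∧ j < s.length then
    if s.getD j 0 ≥ s.getD i 0 * 2 then loopA s mid (i + 1) (j + 1) (res + 2)
    else loopA s mid i (j + 1) res
  else res
termination_by s.length - j
decreasing_by all_goals omega

def maxNumOfMarkedIndices (nums : List Int) : Int :=
  let mid := nums.length / 2
  let s := PySem.List.sorted nums (fun x => x) false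
  loopA s mid 0 mid 0

-- ===== PORT B =====
-- feasible(k): the k smallest pair with the k largest (in-range indices, getD exact).
def feasB (s : List Int) (n k : Nat) : Bool :=
  (List.range k).all (fun i => decide (2 * s.getD i 0 ≤ s.getD (n - k + i) 0))

def bsearchB (s : List Int) (n lo hi : Nat) : Nat :=
  if h : lo < hi then
    let m := (lo + hi + 1) / 2
    if feasB s n m then bsearchB s n m hi else bsearchB s n lo (m - 1)
  else lo
termination_by hi - lo
decreasing_by all_goals omega

def maxNumOfMarkedIndices_alt (nums : List Int) : Int :=
  let s := PySem.List.sorted nums (fun x => x) false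
  2 * (bsearchB s s.length 0 (s.length / 2) : Int)

-- ===== PRECONDITION & SPEC =====
def Spec_maxNumOfMarkedIndices (nums : List Int) (out : Int) : Prop := out = maxNumOfMarkedIndices_alt nums
instance (nums : List Int) (out : Int) : Decidable (Spec_maxNumOfMarkedIndices nums out) := by unfold Spec_maxNumOfMarkedIndices; infer_instance

-- ===== CLAIM (what is proved, stated in full; the proofs are below) =====
def Claim_equal_maxNumOfMarkedIndices : Prop := ∀ (nums : List Int), Dom_maxNumOfMarkedIndices nums → Spec_maxNumOfMarkedIndices nums (maxNumOfMarkedIndices nums)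

-- ===== LEMMAS AND PROOFS =====

-- greedy match count: the final value of i in A's loop
def gloop (s : List Int) (mid i j : Nat) : Nat :=
  if h : i < mid ∧ j < s.length then
    if s.getD j 0 ≥ s.getD i 0 * 2 then gloop s mid (i + 1) (j + 1)
    else gloop s mid i (j + 1)
  else i
termination_by s.length - j
decreasing_by all_goals omega

theorem loopA_spec_aux (s : List Int) (mid : Nat) :
    ∀ f j i res, s.length ≤ j + f →
      loopA s mid i j res = res + 2 * ((gloop s mid i j : Int) - (i : Int)) := by
  intro f
  induction f with
  | zero =>
    intro j i res hle
    rw [loopA, gloop]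
    have : ¬ (i < mid ∧ j < s.length) := by omega
    simp [this]
  | succ f ih =>
    intro j i res hle
    rw [loopA, gloop]
    by_cases h : i < mid ∧ j < s.length
    · simp only [dif_pos h]
      by_cases hc : s.getD j 0 ≥ s.getD i 0 * 2
      · rw [if_pos hc, if_pos hc, ih (j+1) (i+1) (res+2) (by omega)]
        push_cast; ring
      · rw [if_neg hc, if_neg hc, ih (j+1) i res (by omega)]
    · simp [h]

theorem gloop_feas (s : List Int) (mid : Nat)
    (hmid : mid ≤ s.length)
    (hs : ∀ p q : Nat, p ≤ q → q < s.length → s.getD p 0 ≤ s.getD q 0) :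
    ∀ f j i, s.length ≤ j + f → i ≤ mid → i ≤ j → j ≤ s.length →
      (∀ t, t < i → 2 * s.getD t 0 ≤ s.getD (j - i + t) 0) →
      gloop s mid i j ≤ mid ∧
        ∀ t, t < gloop s mid i j →
          2 * s.getD t 0 ≤ s.getD (s.length - gloop s mid i j + t) 0 := by
  intro f
  induction f with
  | zero =>
    intro j i hle hi hij hj hinv
    rw [gloop]
    have hn : ¬ (i < mid ∧ j < s.length) := by omega
    have hjn : j = s.length := by omega
    simp only [dif_neg hn]
    exact ⟨hi, by rw [← hjn]; exact hinv⟩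
  | succ f ih =>
    intro j i hle hi hij hj hinv
    rw [gloop]
    by_cases h : i < mid ∧ j < s.length
    · simp only [dif_pos h]
      by_cases hc : s.getD j 0 ≥ s.getD i 0 * 2
      · rw [if_pos hc]
        refine ih (j+1) (i+1) (by omega) (by omega) (by omega) (by omega) ?_
        intro t ht
        have harith : j + 1 - (i + 1) + t = j - i + t := by omega
        rw [harith]
        rcases Nat.lt_or_ge t i with h' | h'
        · exact hinv t h'
        · have ht' : t = i := by omega
          have harith2 : j - i + t = j := by omega
          rw [harith2, ht']
          omega
      · rw [if_neg hc]
        refine ih (j+1) i (by omega) hi (by omega) (by omega) ?_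
        intro t ht
        refine le_trans (hinv t ht) (hs _ _ (by omega) (by omega))
    · simp only [dif_neg h]
      refine ⟨hi, fun t ht => ?_⟩
      refine le_trans (hinv t ht) (hs _ _ (by omega) (by omega))

theorem gloop_opt (s : List Int) (mid : Nat)
    (hmid2 : mid + mid ≤ s.length)
    (hs : ∀ p q : Nat, p ≤ q → q < s.length → s.getD p 0 ≤ s.getD q 0) :
    ∀ f j i k, s.length ≤ j + f → k ≤ mid → j ≤ s.length → j + k ≤ i + s.length →
      (∀ t, t < k → 2 * s.getD t 0 ≤ s.getD (s.length - k + t) 0) →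
      k ≤ gloop s mid i j := by
  intro f
  induction f with
  | zero =>
    intro j i k hle hk hj hinv hfeas
    rw [gloop]
    have hn : ¬ (i < mid ∧ j < s.length) := by omega
    simp only [dif_neg hn]
    omega
  | succ f ih =>
    intro j i k hle hk hj hinv hfeas
    rw [gloop]
    by_cases h : i < mid ∧ j < s.length
    · simp only [dif_pos h]
      by_cases hc : s.getD j 0 ≥ s.getD i 0 * 2
      · rw [if_pos hc]
        exact ih (j+1) (i+1) k (by omega) hk (by omega) (by omega) hfeas
      · rw [if_neg hc]
        refine ih (j+1) i k (by omega) hk (by omega) ?_ hfeas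
        rcases Nat.lt_or_ge i k with h' | h'
        · -- if j were ≥ s.length - k + i the greedy would have matched: contradiction
          by_contra hcon
          have hji : s.length - k + i ≤ j := by omega
          have h1 : 2 * s.getD i 0 ≤ s.getD (s.length - k + i) 0 := hfeas i h'
          have h2 : s.getD (s.length - k + i) 0 ≤ s.getD j 0 := hs _ _ hji h.2
          omega
        · omega
    · simp only [dif_neg h]
      omega

theorem feasB_iff (s : List Int) (k : Nat) :
    feasB s s.length k = true ↔
      ∀ t, t < k → 2 * s.getD t 0 ≤ s.getD (s.length - k + t) 0 := by
  simp [feasB, List.mem_range]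

theorem bsearch_eq (s : List Int) (g : Nat)
    (hs : ∀ p q : Nat, p ≤ q → q < s.length → s.getD p 0 ≤ s.getD q 0)
    (hgmid : g ≤ s.length / 2)
    (hfeasg : ∀ t, t < g → 2 * s.getD t 0 ≤ s.getD (s.length - g + t) 0)
    (hopt : ∀ k, k ≤ s.length / 2 →
      (∀ t, t < k → 2 * s.getD t 0 ≤ s.getD (s.length - k + t) 0) → k ≤ g) :
    ∀ f lo hi, hi - lo ≤ f → lo ≤ g → g ≤ hi → hi ≤ s.length / 2 →
      bsearchB s s.length lo hi = g := by
  intro f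
  induction f with
  | zero =>
    intro lo hi hle hlo hhi hmid
    rw [bsearchB]
    have : ¬ lo < hi := by omega
    simp only [dif_neg this]
    omega
  | succ f ih =>
    intro lo hi hle hlo hhi hmid
    rw [bsearchB]
    by_cases h : lo < hi
    · simp only [dif_pos h]
      have hm1 : lo < (lo + hi + 1) / 2 := by omega
      have hm2 : (lo + hi + 1) / 2 ≤ hi := by omega
      by_cases hf : feasB s s.length ((lo + hi + 1) / 2) = true
      · rw [if_pos hf]
        have hmg : (lo + hi + 1) / 2 ≤ g :=
          hopt _ (by omega) ((feasB_iff s _).mp hf)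
        exact ih _ hi (by omega) hmg hhi hmid
      · rw [if_neg hf]
        have hgm : g < (lo + hi + 1) / 2 := by
          by_contra hcon
          push Not at hcon
          apply hf
          rw [feasB_iff]
          intro t ht
          have h1 : 2 * s.getD t 0 ≤ s.getD (s.length - g + t) 0 := hfeasg t (by omega)
          have h2 : s.getD (s.length - g + t) 0 ≤ s.getD (s.length - (lo + hi + 1) / 2 + t) 0 := by
            refine hs _ _ (by omega) (by omega)
          omega
        exact ih lo _ (by omega) hlo (by omega) (by omega)
    · simp only [dif_neg h]
      omega

theorem sorted_getD_mono (nums : List Int) :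
    ∀ p q : Nat, p ≤ q → q < (PySem.List.sorted nums (fun x => x) false).length →
      (PySem.List.sorted nums (fun x => x) false).getD p 0 ≤
      (PySem.List.sorted nums (fun x => x) false).getD q 0 := by
  intro p q hpq hq
  have hp : p < (PySem.List.sorted nums (fun x => x) false).length := by omega
  rw [List.getD_eq_getElem _ _ hp, List.getD_eq_getElem _ _ hq]
  exact PySem.List.sorted_id_getElem_mono (xs := nums) hpq hq

-- ===== VERDICT (by name: the statement is the Claim_ definition above) =====
theorem maxNumOfMarkedIndices_spec : Claim_equal_maxNumOfMarkedIndices := by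
  intro nums _
  unfold Spec_maxNumOfMarkedIndices maxNumOfMarkedIndices maxNumOfMarkedIndices_alt
  set s := PySem.List.sorted nums (fun x => x) false with hsdef
  have hlen : s.length = nums.length := PySem.List.length_sorted nums (fun x => x) false
  have hs := sorted_getD_mono nums
  rw [← hsdef] at hs
  simp only [← hlen]
  set n := s.length
  set mid := n / 2 with hmiddef
  have hmidle : mid ≤ n := by omega
  have hmid2 : mid + mid ≤ n := by omega
  -- greedy count g and its properties
  set g := gloop s mid 0 mid with hgdef
  have hfe := gloop_feas s mid hmidle hs (n - mid + 1) mid 0 (by omega) (by omega)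
    (by omega) (by omega) (by omega)
  rw [← hgdef] at hfe
  have hopt : ∀ k, k ≤ mid → (∀ t, t < k → 2 * s.getD t 0 ≤ s.getD (n - k + t) 0) → k ≤ g := by
    intro k hk hfeas
    exact gloop_opt s mid hmid2 hs (n - mid + 1) mid 0 k (by omega) hk (by omega)
      (by omega) hfeas
  have hb : bsearchB s n 0 mid = g :=
    bsearch_eq s g hs hfe.1 hfe.2 hopt (mid + 1) 0 mid (by omega)
      (by omega) hfe.1 (by omega)
  rw [loopA_spec_aux s mid (n - mid + 1) mid 0 0 (by omega), hb, ← hgdef]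
  push_cast; ring
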